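-- pv_equiv track=rewrite | github.com/zuohenlin/Adsim-Insight | ReportEngine/nodes/chapter_generation_node.py | _fix_missing_commas
-- ===== SOURCE A (Python) =====
-- from typing import Any, Dict, List, Tuple, Callable, Optional, Set
--
-- def _fix_missing_commas(text: str) -> Tuple[str, bool]:
--     """在对象/数组连续出现时自动补逗号"""
--     if not text:
--         return text, False
--
--     chars: List[str] = []
--     mutated = False
--     in_string = False
--     escaped = False
--     length = len(text)
--     i = 0
--     while i < length:
--         ch = text[i]
--         chars.append(ch)
--         if escaped:
--             escaped = False
--             i += 1
--             continue
--         if ch == "\\":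
--             escaped = True
--             i += 1
--             continue
--         if ch == '"':
--             in_string = not in_string
--             i += 1
--             continue
--         if not in_string and ch in "}]":
--             j = i + 1
--             while j < length and text[j] in " \t\r\n":
--                 j += 1
--             if j < length:
--                 next_ch = text[j]
--                 if next_ch in "{[":
--                     chars.append(",")
--                     mutated = True
--         i += 1
--     return "".join(chars), mutated
-- ===== SOURCE B (Python) =====
-- from typing import Tuple, List
--
-- def _fix_missing_commas(text: str) -> Tuple[str, bool]:
--     """Single forward pass: buffer whitespace after a closer instead of an inner lookahead loop."""
--     if not text:
--         return text, False
--
--     out: List[str] = []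
--     ws: List[str] = []
--     pending = False   # last significant char was '}' or ']' outside a string
--     mutated = False
--     in_string = False
--     escaped = False
--     for ch in text:
--         if pending and ch in " \t\r\n":
--             ws.append(ch)
--             continue
--         if pending:
--             if ch in "{[":
--                 out.append(",")
--                 mutated = True
--             out.extend(ws)
--             ws = []
--             pending = False
--         out.append(ch)
--         if escaped:
--             escaped = False
--         elif ch == "\\":
--             escaped = True
--         elif ch == '"':
--             in_string = not in_string
--         elif not in_string and ch in "}]":
--             pending = True
--     out.extend(ws)
--     return "".join(out), mutated
-- ===== Notes on version B (the rewrite author's own statement) =====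
-- stated objective: faster
-- what changed: Replaced A's whitespace-skipping lookahead inner loop after each closing bracket by a single forward pass that buffers whitespace after a closer and decides the comma when the next significant character arrives.
import Mathlib
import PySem

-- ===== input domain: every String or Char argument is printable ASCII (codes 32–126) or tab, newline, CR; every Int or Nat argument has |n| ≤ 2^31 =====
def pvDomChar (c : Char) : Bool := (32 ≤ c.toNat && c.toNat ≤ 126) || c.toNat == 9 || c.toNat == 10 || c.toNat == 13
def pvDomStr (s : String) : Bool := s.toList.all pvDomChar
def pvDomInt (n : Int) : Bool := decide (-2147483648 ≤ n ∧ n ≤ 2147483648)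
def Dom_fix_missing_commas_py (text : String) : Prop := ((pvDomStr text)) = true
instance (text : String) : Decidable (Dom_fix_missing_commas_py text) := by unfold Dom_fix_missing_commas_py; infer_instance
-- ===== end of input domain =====

-- B replaces A's quadratic whitespace-lookahead inner loop by a single pass that buffers
-- whitespace after a closing bracket and decides the comma at the next significant char
-- (objective: alternative single-pass decomposition).

def pvIsWs (c : Char) : Bool := c == ' ' || c == '\t' || c == '\r' || c == '\n'
def pvIsOpen (c : Char) : Bool := c == '{' || c == '['
def pvIsClose (c : Char) : Bool := c == '}' || c == ']'

-- ===== PORT A =====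
-- A's inner `while j < length` whitespace-skipping lookahead, on the remaining chars
def pvLookOpen : List Char → Bool
  | [] => false
  | c :: cs => if pvIsWs c then pvLookOpen cs else pvIsOpen c

-- A's main `while i < length` loop, structurally over the character list
def pvGoA : List Char → Bool → Bool → List Char × Bool
  | [], _, _ => ([], false)
  | ch :: rest, inS, esc =>
    if esc then
      let r := pvGoA rest inS false; (ch :: r.1, r.2)
    else if ch == '\\' then
      let r := pvGoA rest inS true; (ch :: r.1, r.2)
    else if ch == '"' then
      let r := pvGoA rest (!inS) false; (ch :: r.1, r.2)
    else if !inS && pvIsClose ch then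
      if pvLookOpen rest then
        let r := pvGoA rest inS false; (ch :: ',' :: r.1, true)
      else
        let r := pvGoA rest inS false; (ch :: r.1, r.2)
    else
      let r := pvGoA rest inS false; (ch :: r.1, r.2)

def fix_missing_commas_py (text : String) : String × Bool :=
  if text == "" then (text, false)
  else
    let r := pvGoA text.toList false false
    (String.ofList r.1, r.2)

-- ===== PORT B =====
-- B's single loop: state (in_string, escaped, pending, ws buffer)
def pvGoB : List Char → Bool → Bool → Bool → List Char → List Char × Bool
  | [], _, _, _, ws => (ws, false)
  | ch :: rest, inS, esc, pending, ws =>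
    if pending && pvIsWs ch then
      pvGoB rest inS esc pending (ws ++ [ch])
    else
      let comma := pending && pvIsOpen ch
      let pre := (if comma then [','] else []) ++ (if pending then ws else [])
      if esc then
        let r := pvGoB rest inS false false []; (pre ++ ch :: r.1, r.2 || comma)
      else if ch == '\\' then
        let r := pvGoB rest inS true false []; (pre ++ ch :: r.1, r.2 || comma)
      else if ch == '"' then
        let r := pvGoB rest (!inS) false false []; (pre ++ ch :: r.1, r.2 || comma)
      else if !inS && pvIsClose ch then
        let r := pvGoB rest inS false true []; (pre ++ ch :: r.1, r.2 || comma)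
      else
        let r := pvGoB rest inS false false []; (pre ++ ch :: r.1, r.2 || comma)

def fix_missing_commas_py_alt (text : String) : String × Bool :=
  if text == "" then (text, false)
  else
    let r := pvGoB text.toList false false false []
    (String.ofList r.1, r.2)

-- ===== PRECONDITION & SPEC =====
def Spec_fix_missing_commas_py (text : String) (out : String × Bool) : Prop := out = fix_missing_commas_py_alt text
instance (text : String) (out : String × Bool) : Decidable (Spec_fix_missing_commas_py text out) := by unfold Spec_fix_missing_commas_py; infer_instance

-- ===== CLAIM (what is proved, stated in full; the proofs are below) =====
def Claim_equal_fix_missing_commas_py : Prop := ∀ (text : String), Dom_fix_missing_commas_py text → Spec_fix_missing_commas_py text (fix_missing_commas_py text)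

-- ===== LEMMAS AND PROOFS =====

-- Mutual invariant: with pending=false and empty buffer, B's loop equals A's loop; with
-- pending=true (reachable only with in_string=false, escaped=false) and buffer ws, B's result is
-- A's result prefixed by the buffered whitespace, with a comma first iff A's lookahead fires.
theorem pvGo_main (l : List Char) :
    (∀ inS esc, pvGoB l inS esc false [] = pvGoA l inS esc) ∧
    (∀ ws : List Char, pvGoB l false false true ws =
      ((if pvLookOpen l then ',' :: ws else ws) ++ (pvGoA l false false).1,
       (pvGoA l false false).2 || pvLookOpen l)) := by
  induction l with
  | nil => simp [pvGoA, pvGoB, pvLookOpen]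
  | cons ch rest ih =>
    obtain ⟨ih1, ih2⟩ := ih
    have hBnil := ih2 []
    refine ⟨?_, ?_⟩
    · intro inS esc
      by_cases hesc : esc
      · simp [pvGoA, pvGoB, hesc, ih1]
      · by_cases hbs : ch = '\\'
        · simp [pvGoA, pvGoB, hesc, hbs, ih1]
        · by_cases hq : ch = '"'
          · simp [pvGoA, pvGoB, hesc, hbs, hq, ih1]
          · by_cases hcl : pvIsClose ch = true
            · cases inS with
              | false =>
                by_cases hlk : pvLookOpen rest
                · simp [pvGoA, pvGoB, hesc, hbs, hq, hcl, hlk, hBnil, ih1]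
                · simp [pvGoA, pvGoB, hesc, hbs, hq, hcl, hlk, hBnil, ih1]
              | true => simp [pvGoA, pvGoB, hesc, hbs, hq, hcl, ih1]
            · simp [pvGoA, pvGoB, hesc, hbs, hq, hcl, ih1]
    · intro ws
      by_cases hws : pvIsWs ch = true
      · have hws' : ((ch = ' ' ∨ ch = '\t') ∨ ch = '\r') ∨ ch = '\n' := by
          simpa [pvIsWs] using hws
        rcases hws' with ((h | h) | h) | h <;> subst h <;>
          simp [pvGoA, pvGoB, pvIsWs, pvIsOpen, pvIsClose, pvLookOpen, ih2] <;>
          split <;> simp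
      · have hlk : pvLookOpen (ch :: rest) = pvIsOpen ch := by simp [pvLookOpen, hws]
        by_cases hbs : ch = '\\'
        · subst hbs
          simp [pvGoA, pvGoB, pvIsWs, pvIsOpen, pvIsClose, pvLookOpen, ih1]
        · by_cases hq : ch = '"'
          · subst hq
            simp [pvGoA, pvGoB, pvIsWs, pvIsOpen, pvIsClose, pvLookOpen, ih1]
          · by_cases hcl : pvIsClose ch = true
            · have hcl' : ch = '}' ∨ ch = ']' := by simpa [pvIsClose] using hcl
              rcases hcl' with h | h <;> subst h <;>
                by_cases hlk2 : pvLookOpen rest <;>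
                simp [pvGoA, pvGoB, pvIsWs, pvIsOpen, pvIsClose, pvLookOpen, hlk2, hBnil, ih1]
            · by_cases hop : pvIsOpen ch = true
              · have hop' : ch = '{' ∨ ch = '[' := by simpa [pvIsOpen] using hop
                rcases hop' with h | h <;> subst h <;>
                  simp [pvGoA, pvGoB, pvIsWs, pvIsOpen, pvIsClose, pvLookOpen, ih1]
              · simp [pvGoA, pvGoB, hws, hbs, hq, hcl, hlk, hop, ih1]

-- ===== VERDICT (by name: the statement is the Claim_ definition above) =====
theorem fix_missing_commas_py_spec : Claim_equal_fix_missing_commas_py := by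
  intro text _
  unfold Spec_fix_missing_commas_py fix_missing_commas_py fix_missing_commas_py_alt
  by_cases h : text = ""
  · simp [h]
  · simp [h, (pvGo_main text.toList).1 false false]
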